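-- pv_equiv track=rewrite | github.com/SundayKoi/inhouse_stats_tracker | ember_stats.py | compute_team_totals
-- ===== SOURCE A (Python) =====
-- def compute_team_totals(participants):
--     team_totals = {}
--     for p in participants:
--         team_id = p.get("teamId", 100)
--         if team_id not in team_totals:
--             team_totals[team_id] = {"kills": 0, "damage": 0, "gold": 0}
--         team_totals[team_id]["kills"] += p.get("kills", 0)
--         team_totals[team_id]["damage"] += p.get("totalDamageDealtToChampions", 0)
--         team_totals[team_id]["gold"] += p.get("goldEarned", 0)
--     return team_totals
-- ===== SOURCE B (Python) =====
-- def compute_team_totals(participants):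
--     # Phase 1: group participants by team id (first-appearance order).
--     groups = {}
--     for p in participants:
--         groups.setdefault(p.get("teamId", 100), []).append(p)
--     # Phase 2: aggregate each group with independent sums.
--     team_totals = {}
--     for team_id, members in groups.items():
--         team_totals[team_id] = {
--             "kills": sum(p.get("kills", 0) for p in members),
--             "damage": sum(p.get("totalDamageDealtToChampions", 0) for p in members),
--             "gold": sum(p.get("goldEarned", 0) for p in members),
--         }
--     return team_totals
-- ===== Notes on version B (the rewrite author's own statement) =====
-- stated objective: alternative
-- what changed: A accumulates all three totals into a nested dict in one interleaved loop; B first groups participants into per-team lists and then, in a second pass over the groups, computes each team's kills/damage/gold as three independent sums.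
import Mathlib
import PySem

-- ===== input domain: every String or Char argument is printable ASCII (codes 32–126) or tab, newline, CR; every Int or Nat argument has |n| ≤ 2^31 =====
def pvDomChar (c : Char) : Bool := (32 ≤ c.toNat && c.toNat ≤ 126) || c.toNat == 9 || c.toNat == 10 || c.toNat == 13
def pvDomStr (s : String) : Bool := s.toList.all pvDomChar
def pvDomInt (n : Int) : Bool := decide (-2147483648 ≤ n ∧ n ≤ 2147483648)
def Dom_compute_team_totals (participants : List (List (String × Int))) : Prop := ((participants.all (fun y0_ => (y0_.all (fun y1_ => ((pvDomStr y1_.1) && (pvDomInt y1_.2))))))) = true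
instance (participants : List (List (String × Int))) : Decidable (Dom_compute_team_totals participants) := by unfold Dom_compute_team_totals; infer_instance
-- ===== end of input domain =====

-- B replaces A's single interleaved accumulation with a two-phase group-then-sum decomposition; same cost, no speed claim.

-- p.get(k, dflt) on a participant dict (assoc list, first match) — shared Python construct of both versions
def pget (p : List (String × Int)) (k : String) (dflt : Int) : Int :=
  (PySem.Dict.mk p).getD k dflt

-- ===== PORT A =====
-- one iteration of A's loop: conditional default insert, then the three `+=` updates
-- (team_totals[team_id] is guaranteed present at the `+=` lines, so modify's default is never used)
def stepA (d : PySem.Dict Int (PySem.Dict String Int)) (p : List (String × Int)) :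
    PySem.Dict Int (PySem.Dict String Int) :=
  let tid := pget p "teamId" 100
  let d1 := if d.contains tid then d
            else d.insert tid (PySem.Dict.mk [("kills", 0), ("damage", 0), ("gold", 0)])
  let d2 := d1.modify tid PySem.Dict.empty (fun i => i.modify "kills" 0 (· + pget p "kills" 0))
  let d3 := d2.modify tid PySem.Dict.empty (fun i => i.modify "damage" 0 (· + pget p "totalDamageDealtToChampions" 0))
  d3.modify tid PySem.Dict.empty (fun i => i.modify "gold" 0 (· + pget p "goldEarned" 0))

def compute_team_totals (participants : List (List (String × Int))) : List (Int × List (String × Int)) :=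
  ((participants.foldl stepA PySem.Dict.empty).items).map (fun q => (q.1, q.2.items))

-- ===== PORT B =====
-- phase 1: groups.setdefault(p.get("teamId", 100), []).append(p)
def groupsB (participants : List (List (String × Int))) : PySem.Dict Int (List (List (String × Int))) :=
  participants.foldl (fun d p => d.modify (pget p "teamId" 100) [] (fun ms => ms ++ [p])) PySem.Dict.empty

def aggB (members : List (List (String × Int))) : List (String × Int) :=
  [("kills",  (members.map (fun p => pget p "kills" 0)).sum),
   ("damage", (members.map (fun p => pget p "totalDamageDealtToChampions" 0)).sum),
   ("gold",   (members.map (fun p => pget p "goldEarned" 0)).sum)]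

def compute_team_totals_alt (participants : List (List (String × Int))) : List (Int × List (String × Int)) :=
  let groups := groupsB participants
  let team_totals := groups.items.foldl
    (fun d q => d.insert q.1 (aggB q.2)) (PySem.Dict.empty : PySem.Dict Int (List (String × Int)))
  team_totals.items

-- ===== PRECONDITION & SPEC =====
def Spec_compute_team_totals (participants : List (List (String × Int))) (out : List (Int × List (String × Int))) : Prop := out = compute_team_totals_alt participants
instance (participants : List (List (String × Int))) (out : List (Int × List (String × Int))) : Decidable (Spec_compute_team_totals participants out) := by unfold Spec_compute_team_totals; infer_instance

-- ===== CLAIM (what is proved, stated in full; the proofs are below) =====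
def Claim_equal_compute_team_totals : Prop := ∀ (participants : List (List (String × Int))), Dom_compute_team_totals participants → Spec_compute_team_totals participants (compute_team_totals participants)

-- ===== LEMMAS AND PROOFS =====

-- proof-only abbreviations: A's inner dict shape, the team key, the per-team member list and sums
def mk3 (a b c : Int) : PySem.Dict String Int :=
  PySem.Dict.mk [("kills", a), ("damage", b), ("gold", c)]

def keyOf (p : List (String × Int)) : Int := pget p "teamId" 100
def filt (l : List (List (String × Int))) (t : Int) : List (List (String × Int)) :=
  l.filter (fun p => keyOf p == t)
def sK (l : List (List (String × Int))) (t : Int) : Int := ((filt l t).map (fun p => pget p "kills" 0)).sum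
def sD (l : List (List (String × Int))) (t : Int) : Int := ((filt l t).map (fun p => pget p "totalDamageDealtToChampions" 0)).sum
def sG (l : List (List (String × Int))) (t : Int) : Int := ((filt l t).map (fun p => pget p "goldEarned" 0)).sum

lemma chain_eq (d : PySem.Dict Int (PySem.Dict String Int)) (tid a b c x y z : Int)
    (hg : d.getD tid PySem.Dict.empty = mk3 a b c) :
    (((d.modify tid PySem.Dict.empty (fun i => i.modify "kills" 0 (· + x))).modify tid
        PySem.Dict.empty (fun i => i.modify "damage" 0 (· + y))).modify tid
        PySem.Dict.empty (fun i => i.modify "gold" 0 (· + z)))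
      = d.insert tid (mk3 (a + x) (b + y) (c + z)) := by
  have e1 : d.modify tid PySem.Dict.empty (fun i => i.modify "kills" 0 (· + x))
      = d.insert tid (mk3 (a + x) b c) := by
    rw [PySem.Dict.modify, hg]; rfl
  have e2 : (d.insert tid (mk3 (a + x) b c)).modify tid PySem.Dict.empty
        (fun i => i.modify "damage" 0 (· + y)) = d.insert tid (mk3 (a + x) (b + y) c) := by
    rw [PySem.Dict.modify, PySem.Dict.getD_insert_self, PySem.Dict.insert_insert_self]; rfl
  have e3 : (d.insert tid (mk3 (a + x) (b + y) c)).modify tid PySem.Dict.empty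
        (fun i => i.modify "gold" 0 (· + z)) = d.insert tid (mk3 (a + x) (b + y) (c + z)) := by
    rw [PySem.Dict.modify, PySem.Dict.getD_insert_self, PySem.Dict.insert_insert_self]; rfl
  rw [e1, e2, e3]

lemma stepA_eq (d : PySem.Dict Int (PySem.Dict String Int)) (p : List (String × Int))
    (a b c : Int)
    (h : (if d.contains (keyOf p) then d else d.insert (keyOf p) (mk3 0 0 0)).getD (keyOf p) PySem.Dict.empty = mk3 a b c) :
    stepA d p = (if d.contains (keyOf p) then d else d.insert (keyOf p) (mk3 0 0 0)).insert (keyOf p)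
        (mk3 (a + pget p "kills" 0) (b + pget p "totalDamageDealtToChampions" 0) (c + pget p "goldEarned" 0)) := by
  show (((if d.contains (keyOf p) then d else d.insert (keyOf p) (mk3 0 0 0)).modify (keyOf p)
        PySem.Dict.empty (fun i => i.modify "kills" 0 (· + pget p "kills" 0))).modify (keyOf p)
        PySem.Dict.empty (fun i => i.modify "damage" 0 (· + pget p "totalDamageDealtToChampions" 0))).modify (keyOf p)
        PySem.Dict.empty (fun i => i.modify "gold" 0 (· + pget p "goldEarned" 0)) = _
  exact chain_eq _ _ _ _ _ _ _ _ h

lemma A_main (l : List (List (String × Int))) :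
    (l.foldl stepA PySem.Dict.empty).items
      = (PySem.Set.ofList (l.map keyOf)).map (fun t => (t, mk3 (sK l t) (sD l t) (sG l t))) := by
  induction l using List.reverseRecOn with
  | nil => rfl
  | append_singleton l p IH =>
    rw [List.foldl_append]
    simp only [List.foldl_cons, List.foldl_nil]
    set d := l.foldl stepA PySem.Dict.empty with hd
    have hkeys : d.keys = PySem.Set.ofList (l.map keyOf) := by
      show d.items.map (·.1) = _
      have hco : ((·.1) ∘ fun t => (t, mk3 (sK l t) (sD l t) (sG l t))) = (id : Int → Int) := rfl
      rw [IH, List.map_map, hco, List.map_id]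
    have hnd : d.keys.Nodup := by rw [hkeys]; exact PySem.Set.nodup_ofList _
    have hmapkey : (l ++ [p]).map keyOf = l.map keyOf ++ [keyOf p] := by simp
    by_cases hmem : keyOf p ∈ PySem.Set.ofList (l.map keyOf)
    · -- team already present
      have hc : d.contains (keyOf p) = true :=
        (PySem.Dict.contains_iff_mem_keys d (keyOf p)).mpr (hkeys ▸ hmem)
      have hitem : (keyOf p, mk3 (sK l (keyOf p)) (sD l (keyOf p)) (sG l (keyOf p))) ∈ d.items := by
        rw [IH]; exact List.mem_map_of_mem hmem
      have hg : d.getD (keyOf p) PySem.Dict.empty = mk3 (sK l (keyOf p)) (sD l (keyOf p)) (sG l (keyOf p)) :=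
        PySem.Dict.getD_of_mem_items _ hitem hnd _
      have hset : PySem.Set.ofList ((l ++ [p]).map keyOf) = PySem.Set.ofList (l.map keyOf) := by
        rw [hmapkey, PySem.Set.ofList_append, PySem.Set.update_cons, PySem.Set.update_nil,
            PySem.Set.add]
        simp [hmem]
      rw [stepA_eq d p (sK l (keyOf p)) (sD l (keyOf p)) (sG l (keyOf p))
            (by rw [if_pos hc]; exact hg),
          if_pos hc, PySem.Dict.items_insert_of_contains _ _ hc, IH, hset, List.map_map]
      apply List.map_congr_left
      intro t ht
      by_cases hteq : t = keyOf p
      · subst hteq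
        have hf : filt (l ++ [p]) (keyOf p) = filt l (keyOf p) ++ [p] := by
          simp [filt, List.filter_append]
        simp [Function.comp, sK, sD, sG, hf]
      · have hne : (keyOf p == t) = false := beq_eq_false_iff_ne.mpr (fun h => hteq h.symm)
        have hf : filt (l ++ [p]) t = filt l t := by
          simp [filt, List.filter_append, hne]
        simp [Function.comp, hteq, sK, sD, sG, hf]
    · -- fresh team
      have hc : d.contains (keyOf p) = false := by
        rw [← Bool.not_eq_true]
        intro h
        exact hmem (hkeys ▸ (PySem.Dict.contains_iff_mem_keys d (keyOf p)).mp h)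
      have hg : (d.insert (keyOf p) (mk3 0 0 0)).getD (keyOf p) PySem.Dict.empty = mk3 0 0 0 :=
        PySem.Dict.getD_insert_self _ _ _ _
      have hnof : l.filter (fun q => keyOf q == keyOf p) = [] := by
        rw [List.filter_eq_nil_iff]
        intro q hq hkq
        have hk : keyOf q = keyOf p := by simpa using hkq
        exact hmem ((PySem.Set.mem_ofList _ _).mpr (hk ▸ List.mem_map_of_mem (f := keyOf) hq))
      have hset : PySem.Set.ofList ((l ++ [p]).map keyOf)
          = PySem.Set.ofList (l.map keyOf) ++ [keyOf p] := by
        rw [hmapkey, PySem.Set.ofList_append, PySem.Set.update_cons, PySem.Set.update_nil,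
            PySem.Set.add]
        simp [hmem]
      rw [stepA_eq d p 0 0 0 (by simp [hc, hg]),
          if_neg (by simp [hc]), PySem.Dict.insert_insert_self,
          PySem.Dict.items_insert_of_not_contains _ _ hc, IH, hset, List.map_append]
      congr 1
      · apply List.map_congr_left
        intro t ht
        have hteq : t ≠ keyOf p := fun h => hmem (h ▸ ht)
        have hne : (keyOf p == t) = false := beq_eq_false_iff_ne.mpr (fun h => hteq h.symm)
        have hf : filt (l ++ [p]) t = filt l t := by
          simp [filt, List.filter_append, hne]
        simp [sK, sD, sG, hf]
      · have hf : filt (l ++ [p]) (keyOf p) = [p] := by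
          simp [filt, List.filter_append, hnof]
        simp [sK, sD, sG, hf]

lemma groupsB_keys (l : List (List (String × Int))) :
    (groupsB l).keys = PySem.Set.ofList (l.map keyOf) := by
  show (l.foldl (fun d p => d.modify (keyOf p) [] (fun ms => ms ++ [p])) PySem.Dict.empty).keys = _
  rw [PySem.Dict.keys_foldl_modify_key l keyOf [] (fun _ p => (· ++ [p]))]
  rw [show (PySem.Dict.empty : PySem.Dict Int (List (List (String × Int)))).keys = [] from rfl,
      PySem.Set.update_nil_left]

lemma groupsB_nodup (l : List (List (String × Int))) : (groupsB l).keys.Nodup := by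
  show (l.foldl (fun d p => d.modify (keyOf p) [] (fun ms => ms ++ [p])) PySem.Dict.empty).keys.Nodup
  exact PySem.Dict.nodup_keys_foldl_modify_key l keyOf [] (fun _ p => (· ++ [p])) _ PySem.Dict.nodup_keys_empty

lemma groupsB_getD (l : List (List (String × Int))) (c : Int) :
    (groupsB l).getD c [] = filt l c := by
  show (l.foldl (fun d p => d.modify (keyOf p) [] (fun ms => ms ++ [p])) PySem.Dict.empty).getD c [] = _
  have hm : l.foldl (fun d p => d.modify (keyOf p) [] (fun ms => ms ++ [p])) PySem.Dict.empty
      = (l.map (fun p => (keyOf p, p))).foldl (fun d q => d.modify q.1 [] (fun ms => ms ++ [q.2])) PySem.Dict.empty :=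
    (List.foldl_map (f := fun p => (keyOf p, p)) (g := fun d q => d.modify q.1 [] (fun ms => ms ++ [q.2])) (l := l) (init := PySem.Dict.empty)).symm
  rw [hm, PySem.Dict.getD_foldl_modify_append, List.filter_map, List.map_map]
  simp [filt, Function.comp_def]

lemma groupsB_items (l : List (List (String × Int))) :
    (groupsB l).items = (PySem.Set.ofList (l.map keyOf)).map (fun t => (t, filt l t)) := by
  rw [PySem.Dict.items_eq_map_keys (groupsB l) (groupsB_nodup l) [], groupsB_keys]
  exact List.map_congr_left (fun t _ => by rw [groupsB_getD])

theorem compute_team_totals_spec_aux (participants : List (List (String × Int))) :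
    compute_team_totals participants = compute_team_totals_alt participants := by
  show ((participants.foldl stepA PySem.Dict.empty).items).map (fun q => (q.1, q.2.items))
      = ((groupsB participants).items.foldl (fun d q => d.insert q.1 (aggB q.2))
          (PySem.Dict.empty : PySem.Dict Int (List (String × Int)))).items
  rw [PySem.Dict.items_foldl_insert_fresh (groupsB participants).items (fun q => q.1)
        (fun q => aggB q.2) PySem.Dict.empty
        (fun a _ => PySem.Dict.contains_empty a.1)
        (by exact groupsB_nodup participants)]
  rw [A_main, groupsB_items, List.map_map, List.map_map]
  rw [show (PySem.Dict.empty : PySem.Dict Int (List (String × Int))).items = [] from rfl,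
      List.nil_append]
  apply List.map_congr_left
  intro t _
  rfl

-- ===== VERDICT (by name: the statement is the Claim_ definition above) =====
theorem compute_team_totals_spec : Claim_equal_compute_team_totals := by
  intro participants _
  exact compute_team_totals_spec_aux participants
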